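-- pv_equiv track=rewrite | github.com/aaronledray/Journal_Club_Publication_Watcher | output_modules/html_builder.py | get_table_types
-- ===== SOURCE A (Python) =====
-- from typing import Dict, List, Any, Tuple
--
-- def get_table_types(components: List[Dict[str, Any]]) -> List[str]:
--     """
--     Get unique paper source types from components.
--
--     Args:
--         components: List of paper components
--
--     Returns:
--         Sorted list of unique source types
--     """
--     types = set(comp.get("Source", "unknown") for comp in components)
--     # Define preferred order
--     order = ["keyword", "pubmed_author", "crossref", "orcid"]
--     sorted_types = []
--
--     for preferred in order:
--         if preferred in types:
--             sorted_types.append(preferred)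
--             types.remove(preferred)
--
--     # Add any remaining types
--     sorted_types.extend(sorted(types))
--     return sorted_types
-- ===== SOURCE B (Python) =====
-- from typing import Dict, List, Any
--
-- _ORDER_INDEX = {"keyword": 0, "pubmed_author": 1, "crossref": 2, "orcid": 3}
--
--
-- def get_table_types(components: List[Dict[str, Any]]) -> List[str]:
--     """Get sorted unique source types: preferred types first (fixed order),
--     the rest alphabetically — via a single key-driven sort."""
--     types = set(comp.get("Source", "unknown") for comp in components)
--     return sorted(types, key=lambda t: (_ORDER_INDEX.get(t, 4), t))
-- ===== Notes on version B (the rewrite author's own statement) =====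
-- stated objective: simpler
-- what changed: Replaces A's two-phase loop (append-and-remove each preferred type, then sort and append the remainder) with a single sorted() call whose key is (preferred-index-or-4, name), so one key-driven sort produces the whole ordering.
import Mathlib
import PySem

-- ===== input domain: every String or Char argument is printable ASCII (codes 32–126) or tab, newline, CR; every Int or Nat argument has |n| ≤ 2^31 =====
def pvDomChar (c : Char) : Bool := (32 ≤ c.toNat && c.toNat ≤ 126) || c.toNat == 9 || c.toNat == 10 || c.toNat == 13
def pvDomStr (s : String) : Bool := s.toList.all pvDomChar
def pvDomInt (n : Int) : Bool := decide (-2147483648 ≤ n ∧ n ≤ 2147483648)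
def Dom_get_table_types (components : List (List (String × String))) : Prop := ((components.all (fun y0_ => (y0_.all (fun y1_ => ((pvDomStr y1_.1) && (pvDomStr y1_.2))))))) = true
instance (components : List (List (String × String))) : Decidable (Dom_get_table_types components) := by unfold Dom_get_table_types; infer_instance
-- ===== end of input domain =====

-- B replaces A's two-phase loop (append/remove preferred types, then sort the rest)
-- by one sorted() call with key (preferred-index-or-4, name); objective: simpler.

-- ===== PORT A =====
def get_table_types (components : List (List (String × String))) : List String :=
  let types : PySem.Set String :=
    PySem.Set.ofList (components.map (fun comp => PySem.Dict.getD (PySem.Dict.mk comp) "Source" "unknown"))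
  let order : List String := ["keyword", "pubmed_author", "crossref", "orcid"]
  -- Python's `types.remove(preferred)` is guarded by `preferred in types`, so it never
  -- raises; under the guard Set.discard computes exactly what Set.remove does.
  let st := order.foldl
    (fun (st : List String × PySem.Set String) preferred =>
      if PySem.Set.contains st.2 preferred then
        (st.1 ++ [preferred], PySem.Set.discard st.2 preferred)
      else st)
    ([], types)
  st.1 ++ PySem.List.sorted st.2 (fun x => x) false

-- ===== PORT B =====
-- _ORDER_INDEX, the module-level dict literal of Source B
def pvOrderIndex : PySem.Dict String Int :=
  PySem.Dict.mk [("keyword", 0), ("pubmed_author", 1), ("crossref", 2), ("orcid", 3)]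

-- Python's tuple key (int, str) compares lexicographically: ported as the Lex order on Int × String.
def get_table_types_alt (components : List (List (String × String))) : List String :=
  let types : PySem.Set String :=
    PySem.Set.ofList (components.map (fun comp => PySem.Dict.getD (PySem.Dict.mk comp) "Source" "unknown"))
  PySem.List.sorted types (fun t => toLex (PySem.Dict.getD pvOrderIndex t 4, t)) false

-- ===== PRECONDITION & SPEC =====
def Spec_get_table_types (components : List (List (String × String))) (out : List String) : Prop := out = get_table_types_alt components
instance (components : List (List (String × String))) (out : List String) : Decidable (Spec_get_table_types components out) := by unfold Spec_get_table_types; infer_instance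

-- ===== CLAIM (what is proved, stated in full; the proofs are below) =====
def Claim_equal_get_table_types : Prop := ∀ (components : List (List (String × String))), Dom_get_table_types components → Spec_get_table_types components (get_table_types components)

-- ===== LEMMAS AND PROOFS =====

-- B's sort key.
def pvKey (t : String) : Lex (Int × String) := toLex (PySem.Dict.getD pvOrderIndex t 4, t)

-- A string different from all four preferred types gets the default index 4.
lemma pvIdx_default (b : String) (h1 : b ≠ "keyword") (h2 : b ≠ "pubmed_author")
    (h3 : b ≠ "crossref") (h4 : b ≠ "orcid") : PySem.Dict.getD pvOrderIndex b 4 = 4 := by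
  simp [pvOrderIndex, PySem.Dict.getD, PySem.Dict.get?,
        Ne.symm h1, Ne.symm h2, Ne.symm h3, Ne.symm h4]

-- A's loop over `order`: appends each preferred type present in S (in `order`'s order)
-- and leaves exactly the elements of S not in `order`.
lemma pvLoop_eq (ord : List String) : ∀ (acc S : List String), S.Nodup → ord.Nodup →
    ord.foldl
      (fun (st : List String × PySem.Set String) preferred =>
        if PySem.Set.contains st.2 preferred then
          (st.1 ++ [preferred], PySem.Set.discard st.2 preferred)
        else st)
      (acc, S)
    = (acc ++ ord.filter (fun p => decide (p ∈ S)), S.filter (fun b => decide (b ∉ ord))) := by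
  induction ord with
  | nil => intro acc S _ _; simp
  | cons p rest ih =>
    intro acc S hS hord
    have hordr : rest.Nodup := hord.of_cons
    have hpnot : p ∉ rest := (List.nodup_cons.mp hord).1
    by_cases hp : p ∈ S
    · rw [List.foldl_cons]
      have hc : PySem.Set.contains S p = true := (PySem.Set.contains_iff S p).mpr hp
      simp only [hc, if_pos]
      rw [ih (acc ++ [p]) (PySem.Set.discard S p) (PySem.Set.nodup_discard S p hS) hordr]
      have h1 : List.filter (fun q => decide (q ∈ PySem.Set.discard S p)) rest
          = List.filter (fun q => decide (q ∈ S)) rest := by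
        apply List.filter_congr
        intro x hx
        have hxp : x ≠ p := fun h => hpnot (h ▸ hx)
        simp [PySem.Set.mem_discard, hxp]
      have h2 : List.filter (fun b => decide (b ∉ rest)) (PySem.Set.discard S p)
          = List.filter (fun b => decide (b ∉ p :: rest)) S := by
        simp only [PySem.Set.discard, List.filter_filter]
        apply List.filter_congr
        intro x _
        by_cases hxp : x = p <;> simp [hxp]
      rw [h1, h2, List.filter_cons_of_pos (by simpa using hp), List.append_assoc]
      rfl
    · rw [List.foldl_cons]
      have hc : PySem.Set.contains S p = false := by
        by_contra h
        exact hp ((PySem.Set.contains_iff S p).mp (by simpa using h))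
      simp only [hc, Bool.false_eq_true, if_neg, not_false_iff]
      rw [ih acc S hS hordr]
      have h2 : List.filter (fun b => decide (b ∉ rest)) S
          = List.filter (fun b => decide (b ∉ p :: rest)) S := by
        apply List.filter_congr
        intro x hx
        have hxp : x ≠ p := fun h => hp (h ▸ hx)
        simp [hxp]
      rw [h2, List.filter_cons_of_neg (by simpa using hp)]

-- A's literal preferred-order list.
def pvOrd : List String := ["keyword", "pubmed_author", "crossref", "orcid"]

-- The heart of the equivalence: for any duplicate-free list of types S,
-- A's "preferred prefix ++ alphabetical remainder" IS the single sort by pvKey.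
lemma pvMain (S : List String) (hS : S.Nodup) :
    PySem.List.sorted S pvKey false
    = pvOrd.filter (fun p => decide (p ∈ S)) ++
        PySem.List.sorted (S.filter (fun b => decide (b ∉ pvOrd))) (fun x => x) false := by
  have hOrdNodup : pvOrd.Nodup := by decide
  have hremNodup : (S.filter (fun b => decide (b ∉ pvOrd))).Nodup := hS.filter _
  have hsortNodup : (PySem.List.sorted (S.filter (fun b => decide (b ∉ pvOrd))) (fun x => x) false).Nodup :=
    (PySem.List.sorted_perm _ _ _).nodup_iff.mpr hremNodup
  have hidx4 : ∀ b ∈ S.filter (fun b => decide (b ∉ pvOrd)), PySem.Dict.getD pvOrderIndex b 4 = 4 := by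
    intro b hb
    have hbo : b ∉ pvOrd := by simpa using (List.mem_filter.mp hb).2
    exact pvIdx_default b (fun h => hbo (h ▸ (by decide))) (fun h => hbo (h ▸ (by decide)))
      (fun h => hbo (h ▸ (by decide))) (fun h => hbo (h ▸ (by decide)))
  apply PySem.List.sorted_eq_of_perm_of_pairwise_lt
  · -- permutation with S
    have h1 : (pvOrd.filter (fun p => decide (p ∈ S))).Perm (S.filter (fun p => decide (p ∈ pvOrd))) := by
      refine (List.perm_ext_iff_of_nodup (hOrdNodup.filter _) (hS.filter _)).mpr ?_
      intro x
      simp only [List.mem_filter, decide_eq_true_eq]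
      exact ⟨fun ⟨h, h'⟩ => ⟨h', h⟩, fun ⟨h, h'⟩ => ⟨h', h⟩⟩
    have h2 : (S.filter (fun b => decide (b ∉ pvOrd)))
        = S.filter (fun b => !decide (b ∈ pvOrd)) := by simp
    refine (List.Perm.append_left _ (PySem.List.sorted_perm _ _ _)).trans ?_
    rw [h2]
    exact (h1.append (List.Perm.refl _)).trans (List.filter_append_perm _ S)
  · -- strictly increasing by pvKey
    rw [List.pairwise_append]
    refine ⟨?_, ?_, ?_⟩
    · -- the preferred prefix: indices 0 < 1 < 2 < 3
      refine List.Pairwise.filter _ (List.Pairwise.imp ?_ (show List.Pairwise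
        (fun a b => PySem.Dict.getD pvOrderIndex a 4 < PySem.Dict.getD pvOrderIndex b 4) pvOrd by decide))
      intro a b h
      exact Prod.Lex.lt_iff.mpr (Or.inl h)
    · -- the remainder: all indices 4, strictly increasing names
      have hle := PySem.List.sorted_pairwise (S.filter (fun b => decide (b ∉ pvOrd))) (fun x => x)
      have hlt : List.Pairwise (fun a b : String => a < b)
          (PySem.List.sorted (S.filter (fun b => decide (b ∉ pvOrd))) (fun x => x) false) :=
        (hle.and hsortNodup).imp (fun h => lt_of_le_of_ne h.1 h.2)
      refine hlt.imp_of_mem ?_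
      intro a b ha hb hab
      have ha4 := hidx4 a ((PySem.List.mem_sorted _ _ _ _).mp ha)
      have hb4 := hidx4 b ((PySem.List.mem_sorted _ _ _ _).mp hb)
      exact Prod.Lex.lt_iff.mpr (Or.inr ⟨by rw [pvKey, pvKey]; exact ha4.trans hb4.symm, hab⟩)
    · -- prefix before remainder: index < 4 vs index = 4
      intro a ha b hb
      have hao : a ∈ pvOrd := (List.mem_filter.mp ha).1
      have ha4 : PySem.Dict.getD pvOrderIndex a 4 < 4 :=
        (show ∀ x ∈ pvOrd, PySem.Dict.getD pvOrderIndex x 4 < 4 by decide) a hao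
      have hb4 := hidx4 b ((PySem.List.mem_sorted _ _ _ _).mp hb)
      have hlt : PySem.Dict.getD pvOrderIndex a 4 < PySem.Dict.getD pvOrderIndex b 4 := by omega
      exact Prod.Lex.lt_iff.mpr (Or.inl hlt)

-- ===== VERDICT (by name: the statement is the Claim_ definition above) =====
theorem get_table_types_spec : Claim_equal_get_table_types := by
  intro components _
  unfold Spec_get_table_types get_table_types get_table_types_alt
  simp only []
  rw [pvLoop_eq ["keyword", "pubmed_author", "crossref", "orcid"] []
    (PySem.Set.ofList (components.map (fun comp => PySem.Dict.getD (PySem.Dict.mk comp) "Source" "unknown")))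
    (PySem.Set.nodup_ofList _) (by decide)]
  rw [List.nil_append]
  exact (pvMain _ (PySem.Set.nodup_ofList _)).symm
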